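-- pv_equiv track=rewrite | github.com/ninja7-bot/LeetCode | validxOR.py | validxOR
-- ===== SOURCE A (Python) =====
-- def validxOR(d):
--     n = len(d)
--     og = [0] * n
--     ogg = [0] * n
--     for i in range(n):
--         if i == n-1:
--             if d[i] == 0:
--                 if og[i] == 0 and og[0] == 0:
--                     continue
--                 elif og[i] == 1 and og[0] == 1:
--                     continue
--             else:
--                 if og[i] == 0 and og[0] == 1:
--                     continue
--                 elif og[i] == 1 and og[0] == 0:
--                     continue
--         if d[i] == 0 and i < n-1:
--             if og[i] == 0:
--                 og[i+1] = 0
--             elif og[i] == 1: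
--                 og[i+1] = 1
--         elif d[i] == 1 and i < n-1:
--             if og[i] == 0:
--                 og[i+1] = 1
--             elif og[i] == 1:
--                 og[i+1] = 0
--             else:
--                 og[i+1]
--     for i in range(n):
--         if i == n-1:
--             if d[i] == og[i] ^ og[0]:
--                 return True
--             else:
--                 return False
--         if d[i] == og[i] ^ og[i+1]:
--             continue
--         else:
--             return False
--     return True
-- ===== SOURCE B (Python) =====
-- def validxOR(d):
--     if not d:
--         return True
--     x = 0
--     for v in d[:-1]:
--         if v == 0:
--             continue
--         if v == 1:
--             x ^= 1
--             continue
--         return False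
--     return d[-1] == x
-- ===== Notes on version B (the rewrite author's own statement) =====
-- stated objective: simpler
-- what changed: Replaced A's two length-n scratch arrays (og/ogg) and separate build and verify passes with a single pass keeping one scalar parity accumulator over the first n-1 elements, early-exiting on the first non-0/1 element and comparing the last element to the accumulated parity.
import Mathlib
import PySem

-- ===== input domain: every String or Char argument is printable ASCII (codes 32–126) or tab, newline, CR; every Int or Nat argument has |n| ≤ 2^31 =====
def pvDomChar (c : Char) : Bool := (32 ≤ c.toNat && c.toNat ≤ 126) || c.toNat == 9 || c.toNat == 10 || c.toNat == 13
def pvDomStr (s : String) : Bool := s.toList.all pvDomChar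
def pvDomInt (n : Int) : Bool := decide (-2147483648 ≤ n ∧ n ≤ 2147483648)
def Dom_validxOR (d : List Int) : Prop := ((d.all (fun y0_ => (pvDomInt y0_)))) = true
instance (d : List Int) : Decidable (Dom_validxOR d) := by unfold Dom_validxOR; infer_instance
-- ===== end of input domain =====

-- B replaces A's two length-n scratch arrays and two passes by one pass with a single scalar
-- parity accumulator (objective: simpler).

-- ===== PORT A =====
-- First loop of A: builds og. The 'i == n-1' block only 'continue's or falls through to
-- statements guarded by 'i < n-1', so at i = n-1 it leaves og unchanged; it is ported as
-- the identity (the 'i < n-1' guards below are A's own).  Every d[i]/og[i]/og[i+1] access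
-- has its index in range, so List.getD/List.set are exact for Python's indexing here.
def buildStep (d : List Int) (n : Nat) (og : List Int) (i : Nat) : List Int :=
  if d.getD i 0 = 0 ∧ i < n - 1 then
    (if og.getD i 0 = 0 then og.set (i+1) 0
     else if og.getD i 0 = 1 then og.set (i+1) 1
     else og)
  else if d.getD i 0 = 1 ∧ i < n - 1 then
    (if og.getD i 0 = 0 then og.set (i+1) 1
     else if og.getD i 0 = 1 then og.set (i+1) 0
     else og)   -- A's 'else: og[i+1]' is a no-op expression
  else og

def buildOg (d : List Int) : List Int :=
  (List.range d.length).foldl (buildStep d d.length) (List.replicate d.length 0)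

-- Second loop of A, early returns as recursion over the loop index.
def verifyLoop (d og : List Int) (n i : Nat) : Bool :=
  if _h : i < n then
    if i = n - 1 then
      (if d.getD i 0 = PySem.Int.bxor (og.getD i 0) (og.getD 0 0) then true else false)
    else
      if d.getD i 0 = PySem.Int.bxor (og.getD i 0) (og.getD (i+1) 0) then verifyLoop d og n (i+1)
      else false
  else true   -- loop ran out: 'return True'
termination_by n - i

def validxOR (d : List Int) : Bool :=
  verifyLoop d (buildOg d) d.length 0
  -- 'ogg' in A is built and never used; omitted.

-- ===== PORT B =====
-- Source B loops over the first n-1 elements with accumulator x, then compares the last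
-- element against x: structurally, a cons recursion whose single-element case is the
-- final comparison.
def altGo (x : Int) : List Int → Bool
  | [] => true
  | [last] => last == x
  | v :: rest =>
    if v = 0 then altGo x rest
    else if v = 1 then altGo (PySem.Int.bxor x 1) rest
    else false

def validxOR_alt (d : List Int) : Bool :=
  if d.isEmpty then true else altGo 0 d

-- ===== PRECONDITION & SPEC =====
def Spec_validxOR (d : List Int) (out : Bool) : Prop := out = validxOR_alt d
instance (d : List Int) (out : Bool) : Decidable (Spec_validxOR d out) := by unfold Spec_validxOR; infer_instance

-- ===== CLAIM (what is proved, stated in full; the proofs are below) =====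
def Claim_equal_validxOR : Prop := ∀ (d : List Int), Dom_validxOR d → Spec_validxOR d (validxOR d)

-- ===== LEMMAS AND PROOFS =====

-- Mathematical description of A's og array: og[0] = 0, og[j+1] per A's first loop.
def ogFun (d : List Int) : Nat → Int
  | 0 => 0
  | j+1 =>
    let p := ogFun d j
    if d.getD j 0 = 0 then p
    else if d.getD j 0 = 1 then (if p = 0 then 1 else 0)
    else 0

theorem ogFun_mem (d : List Int) (j : Nat) : ogFun d j = 0 ∨ ogFun d j = 1 := by
  induction j with
  | zero => left; rfl
  | succ j ih =>
    simp only [ogFun]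
    split_ifs <;> simp_all

theorem getD_set' (l : List Int) (m j : Nat) (a : Int) :
    (l.set m a).getD j 0 = if m = j ∧ m < l.length then a else l.getD j 0 := by
  simp [List.getD_eq_getElem?_getD, List.getElem?_set]
  split_ifs with h1 h2 h3 h4 <;> simp_all
  omega

theorem write_val (d : List Int) (j k len : Nat) (c : Int) (hlen : k+1 < len)
    (hc : ogFun d (k+1) = c) :
    (if k+1 = j ∧ k+1 < len then c else (if j ≤ k then ogFun d j else 0))
      = (if j ≤ k+1 then ogFun d j else 0) := by
  by_cases hj : j = k+1
  · subst hj; simp [hlen, ← hc]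
  · have hng : ¬(k+1 = j ∧ k+1 < len) := by tauto
    rw [if_neg hng]
    by_cases hle : j ≤ k
    · rw [if_pos hle, if_pos (by omega)]
    · rw [if_neg hle, if_neg (by omega)]

theorem nowrite_val (d : List Int) (j k : Nat) (hc : ogFun d (k+1) = 0) :
    (if j ≤ k then ogFun d j else 0) = (if j ≤ k+1 then ogFun d j else 0) := by
  by_cases hj : j = k+1
  · subst hj; simp [hc]
  · by_cases hle : j ≤ k
    · rw [if_pos hle, if_pos (by omega)]
    · rw [if_neg hle, if_neg (by omega)]

theorem build_inv (d : List Int) (k : Nat) (hk : k ≤ d.length) :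
    ((List.range k).foldl (buildStep d d.length) (List.replicate d.length 0)).length = d.length ∧
    ∀ j, j < d.length →
      ((List.range k).foldl (buildStep d d.length) (List.replicate d.length 0)).getD j 0
        = (if j ≤ k then ogFun d j else 0) := by
  induction k with
  | zero =>
    refine ⟨by simp, ?_⟩
    intro j hj
    simp [List.getD_eq_getElem?_getD, hj]
    cases j with
    | zero => simp [ogFun]
    | succ m => simp
  | succ k ih =>
    obtain ⟨hlen, hval⟩ := ih (Nat.le_of_succ_le hk)
    have hk' : k < d.length := hk
    rw [List.range_succ, List.foldl_append, List.foldl_cons, List.foldl_nil]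
    have hBk := hval k hk'
    rw [if_pos le_rfl] at hBk
    generalize hBdef : (List.range k).foldl (buildStep d d.length) (List.replicate d.length 0) = B at hlen hval hBk ⊢
    refine ⟨?_, ?_⟩
    · unfold buildStep; split_ifs <;> simp [hlen]
    · intro j hj
      unfold buildStep
      by_cases hlt : k < d.length - 1
      · have hk1 : k + 1 < d.length := by omega
        have hstep : ogFun d (k+1) =
            (if d.getD k 0 = 0 then ogFun d k
             else if d.getD k 0 = 1 then (if ogFun d k = 0 then 1 else 0) else 0) := rfl
        by_cases hd0 : d.getD k 0 = 0
        · rw [if_pos ⟨hd0, hlt⟩, hBk]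
          rcases ogFun_mem d k with h0 | h1
          · rw [if_pos h0, getD_set', hval j hj, hlen]
            exact write_val d j k d.length 0 hk1 (by rw [hstep, if_pos hd0, h0])
          · rw [if_neg (by rw [h1]; norm_num), if_pos h1, getD_set', hval j hj, hlen]
            exact write_val d j k d.length 1 hk1 (by rw [hstep, if_pos hd0, h1])
        · by_cases hd1 : d.getD k 0 = 1
          · rw [if_neg (by tauto), if_pos ⟨hd1, hlt⟩, hBk]
            rcases ogFun_mem d k with h0 | h1
            · rw [if_pos h0, getD_set', hval j hj, hlen]
              exact write_val d j k d.length 1 hk1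
                (by rw [hstep, if_neg hd0, if_pos hd1, if_pos h0])
            · rw [if_neg (by rw [h1]; norm_num), if_pos h1, getD_set', hval j hj, hlen]
              exact write_val d j k d.length 0 hk1
                (by rw [hstep, if_neg hd0, if_pos hd1, if_neg (by rw [h1]; norm_num)])
          · rw [if_neg (by tauto), if_neg (by tauto), hval j hj]
            exact nowrite_val d j k (by rw [hstep, if_neg hd0, if_neg hd1])
      · have hkk : k = d.length - 1 := by omega
        rw [if_neg (by tauto), if_neg (by tauto), hval j hj]
        have hjk : j ≤ k := by omega
        rw [if_pos hjk, if_pos (by omega)]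

theorem buildOg_getD (d : List Int) (j : Nat) (hj : j < d.length) :
    (buildOg d).getD j 0 = ogFun d j := by
  have := (build_inv d d.length le_rfl).2 j hj
  rw [buildOg, this, if_pos (Nat.le_of_lt hj)]

theorem verify_eq (d og : List Int) (hog : ∀ j, j < d.length → og.getD j 0 = ogFun d j) :
    ∀ m i, d.length - i = m → i < d.length →
      verifyLoop d og d.length i = altGo (ogFun d i) (d.drop i) := by
  intro m
  induction m with
  | zero => intro i hm hi; omega
  | succ m ih =>
    intro i hm hi
    have hdrop : d.drop i = d[i] :: d.drop (i+1) := List.drop_eq_getElem_cons hi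
    have hdi : d.getD i 0 = d[i] := List.getD_eq_getElem d 0 hi
    have hb00 : PySem.Int.bxor (0:Int) 0 = 0 := by decide
    have hb01 : PySem.Int.bxor (0:Int) 1 = 1 := by decide
    have hb11 : PySem.Int.bxor (1:Int) 1 = 0 := by decide
    rw [verifyLoop, dif_pos hi]
    by_cases hlast : i = d.length - 1
    · have hdone : d.drop (i+1) = [] := by apply List.drop_eq_nil_of_le; omega
      have h00 : ogFun d 0 = 0 := rfl
      rw [if_pos hlast, hog i hi, hog 0 (by omega), hdrop, hdone, h00,
        PySem.Int.bxor_zero, hdi]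
      by_cases h : d[i] = ogFun d i <;> simp [altGo, h]
    · have hi1 : i + 1 < d.length := by omega
      have hdrop1 : d.drop (i+1) = d[i+1] :: d.drop (i+2) := List.drop_eq_getElem_cons hi1
      have hstep : ogFun d (i+1) =
          (if d.getD i 0 = 0 then ogFun d i
           else if d.getD i 0 = 1 then (if ogFun d i = 0 then 1 else 0) else 0) := rfl
      have ihnext : verifyLoop d og d.length (i+1) = altGo (ogFun d (i+1)) (d.drop (i+1)) :=
        ih (i+1) (by omega) hi1
      rw [if_neg hlast, hog i hi, hog (i+1) hi1, hdrop]
      by_cases hd0 : d.getD i 0 = 0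
      · have hdi0 : d[i] = (0:Int) := by rw [← hdi]; exact hd0
        rcases ogFun_mem d i with h0 | h1
        · have hnext : ogFun d (i+1) = 0 := by rw [hstep, if_pos hd0, h0]
          rw [hd0, h0, hnext, hb00, if_pos rfl, ihnext, hnext, hdrop1]
          simp [altGo, hdi0]
        · have hnext : ogFun d (i+1) = 1 := by rw [hstep, if_pos hd0, h1]
          rw [hd0, h1, hnext, hb11, if_pos rfl, ihnext, hnext, hdrop1]
          simp [altGo, hdi0]
      · by_cases hd1 : d.getD i 0 = 1
        · have hdi1 : d[i] = (1:Int) := by rw [← hdi]; exact hd1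
          rcases ogFun_mem d i with h0 | h1
          · have hnext : ogFun d (i+1) = 1 := by
              rw [hstep, if_neg hd0, if_pos hd1, if_pos h0]
            rw [hd1, h0, hnext, hb01, if_pos rfl, ihnext, hnext, hdrop1]
            simp [altGo, hdi1, hb01]
          · have hnext : ogFun d (i+1) = 0 := by
              rw [hstep, if_neg hd0, if_pos hd1, if_neg (by rw [h1]; norm_num)]
            have hb10 : PySem.Int.bxor (1:Int) 0 = 1 := by decide
            rw [hd1, h1, hnext, hb10, if_pos rfl, ihnext, hnext, hdrop1]
            simp [altGo, hdi1]
        · have hdi0' : ¬ d[i] = (0:Int) := by rw [← hdi]; exact hd0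
          have hdi1' : ¬ d[i] = (1:Int) := by rw [← hdi]; exact hd1
          have hnext : ogFun d (i+1) = 0 := by rw [hstep, if_neg hd0, if_neg hd1]
          rw [hnext, PySem.Int.bxor_zero]
          rcases ogFun_mem d i with h0 | h1
          · rw [h0, if_neg hd0, hdrop1]
            simp only [altGo]
            rw [if_neg hdi0', if_neg hdi1']
          · rw [h1, if_neg hd1, hdrop1]
            simp only [altGo]
            rw [if_neg hdi0', if_neg hdi1']

theorem main_eq (d : List Int) : validxOR d = validxOR_alt d := by
  rcases d with _ | ⟨a, t⟩
  · rw [validxOR, validxOR_alt, verifyLoop]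
    simp
  · rw [validxOR, validxOR_alt, if_neg (by simp)]
    have h := verify_eq (a :: t) (buildOg (a :: t)) (fun j hj => buildOg_getD (a :: t) j hj)
      ((a :: t).length - 0) 0 rfl (by simp)
    rw [h]
    norm_num [ogFun]

-- ===== VERDICT (by name: the statement is the Claim_ definition above) =====
theorem validxOR_spec : Claim_equal_validxOR := by
  intro d _
  unfold Spec_validxOR
  exact main_eq d
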